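-- pv_equiv track=rewrite | github.com/ddast/xandra-server-py | protocol.py | _utf8_to_unicode
-- ===== SOURCE A (Python) =====
-- def _utf8_to_unicode(c):
--     if not (c[0] & 0x80):
--         return 1, c[0]
--     for i in range(2,7):
--         if c[0] & ((0xff>>(i+1))^0xff) == (0xff>>i)^0xff:
--             if i > len(c):
--                 return i, None
--             res = (c[0] & 0xff>>(i+1))<<(6*(i-1))
--             for j in range(1, i):
--                 if (c[j] & 0xc0) != 0x80:
--                     return 1, None
--                 res = res | (c[j] & 0x3f)<<(6*(i-j-1))
--             return i, res
--     return 1, None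
-- ===== SOURCE B (Python) =====
-- def _utf8_to_unicode(c):
--     b0 = c[0] % 256
--     if b0 < 0x80:
--         return 1, c[0]
--     # sequence length = number of leading one-bits of b0 (via bit_length of its complement)
--     n = 8 - (255 - b0).bit_length()
--     if n < 2 or n > 6:
--         return 1, None
--     if n > len(c):
--         return n, None
--     tail = c[1:n]
--     if not all((b % 256) // 64 == 2 for b in tail):
--         return 1, None
--     val = b0 % (1 << (7 - n))
--     for b in tail:
--         val = val * 64 + b % 64
--     return n, val
-- ===== Notes on version B (the rewrite author's own statement) =====
-- stated objective: alternative
-- what changed: Replaces A's search over candidate lengths 2..6 with per-length bitmask equations and a single early-returning OR-accumulation loop by: sequence length computed directly as the count of leading one-bits of the lead byte via (255-b0).bit_length(), one slice of the continuation bytes, a separate all() validation pass over the slice, then an arithmetic Horner pass (val*64 + b%64) with no bitwise operators.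
import Mathlib
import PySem

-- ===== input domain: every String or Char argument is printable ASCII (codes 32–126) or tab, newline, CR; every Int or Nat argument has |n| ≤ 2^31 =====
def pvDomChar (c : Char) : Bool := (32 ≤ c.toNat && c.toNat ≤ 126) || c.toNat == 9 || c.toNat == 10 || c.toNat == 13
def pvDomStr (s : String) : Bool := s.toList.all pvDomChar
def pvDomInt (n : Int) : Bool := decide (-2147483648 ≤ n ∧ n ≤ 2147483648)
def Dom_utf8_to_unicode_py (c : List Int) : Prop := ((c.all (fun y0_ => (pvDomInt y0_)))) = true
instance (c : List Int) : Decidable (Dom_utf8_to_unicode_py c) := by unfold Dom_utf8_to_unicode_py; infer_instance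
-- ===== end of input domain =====

-- B replaces A's search over candidate lengths 2..6 (per-length leader-mask equations and positional
-- ORs in one early-returning loop) by a leading-ones count via bit_length, a slice of the continuation
-- bytes, a separate all() validation pass, and an arithmetic Horner accumulation (objective: alternative).

-- ===== PORT A =====
-- inner loop 'for j in range(1, i)': OR each continuation byte's low 6 bits into place; early
-- return (1, None) on a bad byte.  The index j is in range here (j < i ≤ len c, checked before
-- the loop), so the total pyGetD is exact.
def utf8A_cont (c : List Int) (i : Int) : Int → List Int → Int × Option Int
  | res, [] => (i, some res)
  | res, j :: js =>
    if PySem.Int.band (PySem.List.pyGetD c j 0) 0xc0 ≠ 0x80 then (1, none)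
    else utf8A_cont c i
      (PySem.Int.bor res ((PySem.Int.band (PySem.List.pyGetD c j 0) 0x3f) <<< (6*(i-j-1)).toNat))
      js

-- outer loop 'for i in range(2, 7)': finds the first i whose leader mask matches the lead byte; shift
-- amounts i+1, i, 6*(i-1) are nonnegative for every i in the range, so .toNat is exact.
def utf8A_search (c : List Int) (c0 : Int) : List Int → Int × Option Int
  | [] => (1, none)
  | i :: is =>
    if PySem.Int.band c0 (PySem.Int.bxor (0xff >>> (i+1).toNat) 0xff)
        = PySem.Int.bxor (0xff >>> i.toNat) 0xff then
      if PySem.List.len c < i then (i, none)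
      else utf8A_cont c i
        ((PySem.Int.band c0 (0xff >>> (i+1).toNat)) <<< (6*(i-1)).toNat)
        (PySem.List.pyRange 1 i 1)
    else utf8A_search c c0 is

-- subscripting the empty list raises IndexError — excluded by Pre_; under Pre_ the total pyGetD is exact.
def utf8_to_unicode_py (c : List Int) : Int × Option Int :=
  if PySem.Int.band (PySem.List.pyGetD c 0 0) 0x80 = 0 then (1, some (PySem.List.pyGetD c 0 0))
  else utf8A_search c (PySem.List.pyGetD c 0 0) (PySem.List.pyRange 2 7 1)

-- ===== PORT B =====
-- Source B's multi-byte branch, as a function of c and the lead byte b0 = c[0] % 256: sequence length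
-- from the count of leading one-bits (8 - (255-b0).bit_length()), one slice of the continuation
-- bytes, an all() validation pass over the slice, then an arithmetic Horner pass.
def utf8B_rest (c : List Int) (b0 : Int) : Int × Option Int :=
  let n : Int := 8 - (PySem.Int.bitLength (255 - b0) : Int)
  if n < 2 ∨ 6 < n then (1, none)
  else if PySem.List.len c < n then (n, none)
  else
    let tail := PySem.List.slice c (some 1) (some n)
    if tail.all (fun b => PySem.Int.floordiv (PySem.Int.mod b 256) 64 == 2) = false then (1, none)
    else (n, some (tail.foldl (fun v b => v * 64 + PySem.Int.mod b 64)
      (PySem.Int.mod b0 ((1:Int) <<< (7 - n).toNat))))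

-- subscripting the empty list raises IndexError — excluded by Pre_; under Pre_ the total pyGetD is exact.
def utf8_to_unicode_py_alt (c : List Int) : Int × Option Int :=
  let b0 := PySem.Int.mod (PySem.List.pyGetD c 0 0) 256
  if b0 < 0x80 then (1, some (PySem.List.pyGetD c 0 0))
  else utf8B_rest c b0

-- ===== PRECONDITION & SPEC =====
-- Pre_ excludes only the empty list, on which A (and B) raise IndexError at the first subscript.
def Pre_utf8_to_unicode_py (c : List Int) : Prop := c ≠ []
instance (c : List Int) : Decidable (Pre_utf8_to_unicode_py c) := by unfold Pre_utf8_to_unicode_py; infer_instance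
def pvWitness_utf8_to_unicode_py : List Int := [0xC3, 0xA9]

def Spec_utf8_to_unicode_py (c : List Int) (out : Int × Option Int) : Prop := out = utf8_to_unicode_py_alt c
instance (c : List Int) (out : Int × Option Int) : Decidable (Spec_utf8_to_unicode_py c out) := by unfold Spec_utf8_to_unicode_py; infer_instance

-- ===== CLAIM (what is proved, stated in full; the proofs are below) =====
def Claim_equal_utf8_to_unicode_py : Prop := ∀ (c : List Int), Dom_utf8_to_unicode_py c → Pre_utf8_to_unicode_py c → Spec_utf8_to_unicode_py c (utf8_to_unicode_py c)

-- ===== LEMMAS AND PROOFS =====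

-- (a &&& b) % 2 as arithmetic on the low bits
theorem pv_mod2_and (a b : Nat) : (a &&& b) % 2 = a % 2 * (b % 2) := by
  rw [← Nat.and_one_is_mod (a &&& b), Nat.and_assoc, Nat.and_one_is_mod b]
  rcases Nat.mod_two_eq_zero_or_one b with hb | hb <;> rw [hb] <;>
    simp [Nat.and_one_is_mod]

theorem pv_mod2_or (a b : Nat) (h : a % 2 * (b % 2) = 0) : (a ||| b) % 2 = a % 2 + b % 2 := by
  rw [← Nat.and_one_is_mod (a ||| b), Nat.and_or_distrib_right, Nat.and_one_is_mod a, Nat.and_one_is_mod b]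
  rcases Nat.mod_two_eq_zero_or_one a with ha | ha <;>
    rcases Nat.mod_two_eq_zero_or_one b with hb | hb <;>
    rw [ha, hb] at h ⊢ <;> simp_all

-- or of bit-disjoint naturals is their sum
theorem pv_or_eq_add (a : Nat) : ∀ b : Nat, a &&& b = 0 → a ||| b = a + b := by
  induction a using Nat.strong_induction_on with
  | _ a ih =>
    match a with
    | 0 => intro b _; simp
    | (m+1) =>
      intro b h
      have h2 : (m+1)/2 &&& b/2 = 0 := by rw [← Nat.and_div_two, h]
      have IH := ih ((m+1)/2) (by omega) (b/2) h2
      have hm2 : ((m+1) &&& b) % 2 = (m+1) % 2 * (b % 2) := pv_mod2_and _ _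
      rw [h] at hm2
      have hor2 : ((m+1) ||| b) % 2 = (m+1) % 2 + b % 2 := pv_mod2_or _ _ hm2.symm
      have hdiv : ((m+1) ||| b) / 2 = (m+1)/2 ||| b/2 := Nat.or_div_two
      omega

-- subtracting a submask is xor with it
theorem pv_sub_and (m y : Nat) : m - (m &&& y) = m ^^^ (m &&& y) := by
  induction m using Nat.strong_induction_on generalizing y with
  | _ m ih =>
    match m with
    | 0 => simp
    | (m+1) =>
      have IH := ih ((m+1)/2) (by omega) (y/2)
      have e1 : ((m+1) &&& y) / 2 = (m+1)/2 &&& y/2 := Nat.and_div_two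
      have e2 : ((m+1) ^^^ ((m+1) &&& y)) / 2 = (m+1)/2 ^^^ ((m+1)/2 &&& y/2) := by
        rw [Nat.xor_div_two, e1]
      have e3 : ((m+1) &&& y) % 2 = (m+1) % 2 * (y % 2) := pv_mod2_and _ _
      have e4 : ((m+1) ^^^ ((m+1) &&& y)) % 2 = ((m+1) % 2 + ((m+1) &&& y) % 2) % 2 := by
        rw [Nat.xor_mod_two_eq]; omega
      have le1 : (m+1)/2 &&& y/2 ≤ (m+1)/2 := Nat.and_le_left
      rcases Nat.mod_two_eq_zero_or_one (m+1) with hm | hm <;>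
        rcases Nat.mod_two_eq_zero_or_one y with hy | hy <;>
        rw [hm, hy] at e3 <;> omega

-- masking below 256 only sees x mod 256
theorem pv_and_mod256 (x mm : Nat) (h : mm < 256) : x &&& mm = (x % 256) &&& mm := by
  apply Nat.eq_of_testBit_eq; intro i
  rcases lt_or_ge i 8 with hi | hi
  · rw [show (256:Nat) = 2^8 from rfl, Nat.testBit_and, Nat.testBit_and, Nat.testBit_mod_two_pow]
    simp [hi]
  · have h256 : (256:Nat) ≤ 2^i := by
      calc (256:Nat) = 2^8 := rfl
        _ ≤ 2^i := Nat.pow_le_pow_right (by norm_num) hi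
    have h2 : mm.testBit i = false := Nat.testBit_lt_two_pow (lt_of_lt_of_le h h256)
    simp [Nat.testBit_and, h2]

theorem pv_and_255 (x : Nat) : x &&& 255 = x % 256 := by
  rw [show (255:Nat) = 2^8 - 1 from rfl, Nat.and_two_pow_sub_one_eq_mod]

theorem pv_compl_fact (m y : Nat) (hm : m < 256) : m - (m &&& y) = (255 - y % 256) &&& m := by
  have hy : m &&& y = m &&& (y % 256) := by
    rw [Nat.and_comm m y, pv_and_mod256 y m hm, Nat.and_comm]
  have h255 : 255 - y % 256 = 255 ^^^ (y % 256) := by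
    have hs : (255:Nat) &&& (y % 256) = y % 256 := by
      rw [Nat.and_comm, pv_and_255]; omega
    rw [show (255:Nat) - y % 256 = 255 - (255 &&& (y % 256)) by rw [hs],
        pv_sub_and 255 (y % 256), hs]
  rw [hy, pv_sub_and m (y % 256), h255, Nat.and_xor_distrib_right]
  have hmm : (255:Nat) &&& m = m := by rw [Nat.and_comm, pv_and_255]; omega
  rw [hmm, Nat.and_comm (y % 256) m]

-- a & m (m < 256) only depends on the low byte a & 0xff — Python-exact also on negatives
theorem pv_band_loc (a m : Int) (h0 : 0 ≤ m) (h1 : m < 256) :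
    PySem.Int.band a m = PySem.Int.band (PySem.Int.band a 255) m := by
  have hmt : m.toNat < 256 := by omega
  rcases le_or_gt 0 a with ha | ha
  · rw [show PySem.Int.band a 255 = ((a.toNat &&& 255 : Nat) : Int) by
      simp [PySem.Int.band, ha]]
    rw [show PySem.Int.band a m = ((a.toNat &&& m.toNat : Nat) : Int) by
      simp [PySem.Int.band, ha, h0]]
    rw [show PySem.Int.band ((a.toNat &&& 255 : Nat) : Int) m
        = (((a.toNat &&& 255) &&& m.toNat : Nat) : Int) by
      simp [PySem.Int.band, h0]]
    rw [pv_and_255, ← pv_and_mod256 _ _ hmt]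
  · rw [show PySem.Int.band a 255 = (((255:Nat) - (255 &&& (-a-1).toNat) : Nat) : Int) by
      simp [PySem.Int.band, not_le.mpr ha]]
    rw [show PySem.Int.band a m = ((m.toNat - (m.toNat &&& (-a-1).toNat) : Nat) : Int) by
      simp [PySem.Int.band, not_le.mpr ha, h0]]
    rw [show (255:Nat) &&& (-a-1).toNat = (-a-1).toNat % 256 by rw [Nat.and_comm, pv_and_255]]
    rw [show PySem.Int.band (((255 - (-a-1).toNat % 256 : Nat)) : Int) m
        = (((255 - (-a-1).toNat % 256) &&& m.toNat : Nat) : Int) by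
      simp [PySem.Int.band, h0]]
    rw [pv_compl_fact _ _ hmt]

-- the low byte a & 0xff IS Python's a % 256, also on negatives
theorem pv_band255_mod (a : Int) : PySem.Int.band a 255 = PySem.Int.mod a 256 := by
  rw [PySem.Int.mod_eq_emod_of_pos (by norm_num)]
  rcases le_or_gt 0 a with ha | ha
  · rw [show PySem.Int.band a 255 = ((a.toNat &&& 255 : Nat) : Int) by simp [PySem.Int.band, ha]]
    rw [pv_and_255]
    omega
  · rw [show PySem.Int.band a 255 = (((255:Nat) - (255 &&& (-a-1).toNat) : Nat) : Int) by
      simp [PySem.Int.band, not_le.mpr ha]]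
    rw [show (255:Nat) &&& (-a-1).toNat = (-a-1).toNat % 256 by rw [Nat.and_comm, pv_and_255]]
    omega

-- a & m (m < 256) only depends on a % 256
theorem pv_band_mod_loc (a m : Int) (h0 : 0 ≤ m) (h1 : m < 256) :
    PySem.Int.band a m = PySem.Int.band (PySem.Int.mod a 256) m := by
  rw [pv_band_loc a m h0 h1, pv_band255_mod]

theorem pv_mod256_nonneg (a : Int) : 0 ≤ PySem.Int.mod a 256 := PySem.Int.mod_nonneg a (by norm_num)
theorem pv_mod256_lt (a : Int) : PySem.Int.mod a 256 < 256 := PySem.Int.mod_lt a (by norm_num)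

-- the outcome of A's leader search, as a function of the lead byte, written with A's own mask expressions
def pv_headA (b : Int) : Option (Int × Int) :=
  if PySem.Int.band b (PySem.Int.bxor (0xff >>> ((2:Int)+1).toNat) 0xff) = PySem.Int.bxor (0xff >>> (2:Int).toNat) 0xff then
    some (2, PySem.Int.band b (0xff >>> ((2:Int)+1).toNat))
  else if PySem.Int.band b (PySem.Int.bxor (0xff >>> ((3:Int)+1).toNat) 0xff) = PySem.Int.bxor (0xff >>> (3:Int).toNat) 0xff then
    some (3, PySem.Int.band b (0xff >>> ((3:Int)+1).toNat))
  else if PySem.Int.band b (PySem.Int.bxor (0xff >>> ((4:Int)+1).toNat) 0xff) = PySem.Int.bxor (0xff >>> (4:Int).toNat) 0xff then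
    some (4, PySem.Int.band b (0xff >>> ((4:Int)+1).toNat))
  else if PySem.Int.band b (PySem.Int.bxor (0xff >>> ((5:Int)+1).toNat) 0xff) = PySem.Int.bxor (0xff >>> (5:Int).toNat) 0xff then
    some (5, PySem.Int.band b (0xff >>> ((5:Int)+1).toNat))
  else if PySem.Int.band b (PySem.Int.bxor (0xff >>> ((6:Int)+1).toNat) 0xff) = PySem.Int.bxor (0xff >>> (6:Int).toNat) 0xff then
    some (6, PySem.Int.band b (0xff >>> ((6:Int)+1).toNat))
  else none

-- B's leading-ones classification, as a function of the lead byte: length and leader data bits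
def pv_headB (b : Int) : Option (Int × Int) :=
  let n : Int := 8 - (PySem.Int.bitLength (255 - b) : Int)
  if n < 2 ∨ 6 < n then none
  else some (n, PySem.Int.mod b ((1:Int) <<< (7 - n).toNat))

set_option maxRecDepth 100000 in
theorem pv_head_eq : ∀ p : Fin 256, pv_headA ((p.val : Nat) : Int) = pv_headB ((p.val : Nat) : Int) := by
  decide

theorem pv_headA_loc (a : Int) : pv_headA a = pv_headA (PySem.Int.mod a 256) := by
  unfold pv_headA
  rw [pv_band_mod_loc a (PySem.Int.bxor (0xff >>> ((2:Int)+1).toNat) 0xff) (by decide) (by decide),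
      pv_band_mod_loc a (0xff >>> ((2:Int)+1).toNat) (by decide) (by decide),
      pv_band_mod_loc a (PySem.Int.bxor (0xff >>> ((3:Int)+1).toNat) 0xff) (by decide) (by decide),
      pv_band_mod_loc a (0xff >>> ((3:Int)+1).toNat) (by decide) (by decide),
      pv_band_mod_loc a (PySem.Int.bxor (0xff >>> ((4:Int)+1).toNat) 0xff) (by decide) (by decide),
      pv_band_mod_loc a (0xff >>> ((4:Int)+1).toNat) (by decide) (by decide),
      pv_band_mod_loc a (PySem.Int.bxor (0xff >>> ((5:Int)+1).toNat) 0xff) (by decide) (by decide),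
      pv_band_mod_loc a (0xff >>> ((5:Int)+1).toNat) (by decide) (by decide),
      pv_band_mod_loc a (PySem.Int.bxor (0xff >>> ((6:Int)+1).toNat) 0xff) (by decide) (by decide),
      pv_band_mod_loc a (0xff >>> ((6:Int)+1).toNat) (by decide) (by decide)]

theorem pv_headAB (a : Int) : pv_headA a = pv_headB (PySem.Int.mod a 256) := by
  rw [pv_headA_loc]
  have h0 := pv_mod256_nonneg a
  have h1 := pv_mod256_lt a
  have hcast : PySem.Int.mod a 256 = (((PySem.Int.mod a 256).toNat : Nat) : Int) :=
    (Int.toNat_of_nonneg h0).symm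
  rw [hcast]
  exact pv_head_eq ⟨(PySem.Int.mod a 256).toNat, by omega⟩

theorem pv_A_search_eq (c : List Int) (c0 : Int) :
    utf8A_search c c0 (PySem.List.pyRange 2 7 1) =
      match pv_headA c0 with
      | none => (1, none)
      | some (i, d) =>
        if PySem.List.len c < i then (i, none)
        else utf8A_cont c i (d <<< (6*(i-1)).toNat) (PySem.List.pyRange 1 i 1) := by
  rw [show PySem.List.pyRange 2 7 1 = [2,3,4,5,6] from by decide]
  simp only [utf8A_search, pv_headA]
  split_ifs <;> dsimp only <;> split_ifs <;> rfl

theorem pv_B_rest_eq (c : List Int) (b : Int) :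
    utf8B_rest c b =
      match pv_headB b with
      | none => (1, none)
      | some (n, d) =>
        if PySem.List.len c < n then (n, none)
        else
          let tail := PySem.List.slice c (some 1) (some n)
          if tail.all (fun x => PySem.Int.floordiv (PySem.Int.mod x 256) 64 == 2) = false then (1, none)
          else (n, some (tail.foldl (fun v x => v * 64 + PySem.Int.mod x 64) d)) := by
  unfold utf8B_rest pv_headB
  dsimp only
  by_cases h1 : 8 - ((PySem.Int.bitLength (255 - b) : Nat) : Int) < 2 ∨ 6 < 8 - ((PySem.Int.bitLength (255 - b) : Nat) : Int)
  · simp only [if_pos h1]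
  · simp only [if_neg h1]

theorem pv_headB_cases (b n d : Int) (h : pv_headB b = some (n, d)) :
    (2 ≤ n ∧ n ≤ 6) ∧ d = PySem.Int.mod b ((1:Int) <<< (7 - n).toNat) := by
  unfold pv_headB at h
  dsimp only at h
  split_ifs at h with hc
  rw [Option.some.injEq, Prod.mk.injEq] at h
  obtain ⟨h1, h2⟩ := h
  rw [not_or, not_lt, not_lt] at hc
  subst h1
  subst h2
  exact ⟨by omega, rfl⟩

-- the ASCII test: bit 7 clear iff the low byte is below 128
set_option maxRecDepth 100000 in
theorem pv_ascii (a : Int) : PySem.Int.band a 0x80 = 0 ↔ PySem.Int.mod a 256 < 0x80 := by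
  rw [pv_band_mod_loc a 0x80 (by norm_num) (by norm_num)]
  have h0 := pv_mod256_nonneg a
  have h1 := pv_mod256_lt a
  have hcast : PySem.Int.mod a 256 = (((PySem.Int.mod a 256).toNat : Nat) : Int) :=
    (Int.toNat_of_nonneg h0).symm
  rw [hcast]
  have key : ∀ p : Fin 256,
      (decide (PySem.Int.band ((p.val : Nat) : Int) 0x80 = 0)) = (decide (((p.val : Nat) : Int) < 0x80)) := by
    decide
  have := key ⟨(PySem.Int.mod a 256).toNat, by omega⟩
  constructor <;> intro hh
  · have : decide (((((PySem.Int.mod a 256).toNat : Nat)) : Int) < 0x80) = true := by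
      rw [← this]; exact decide_eq_true hh
    exact of_decide_eq_true this
  · have : decide (PySem.Int.band ((((PySem.Int.mod a 256).toNat : Nat)) : Int) 0x80 = 0) = true := by
      rw [this]; exact decide_eq_true hh
    exact of_decide_eq_true this

-- a good continuation byte: top two bits 10 iff the low byte's high sextet is 2
set_option maxRecDepth 100000 in
theorem pv_good (b : Int) :
    (PySem.Int.band b 0xc0 = 0x80) ↔ (PySem.Int.floordiv (PySem.Int.mod b 256) 64 = 2) := by
  rw [pv_band_mod_loc b 0xc0 (by norm_num) (by norm_num)]
  have h0 := pv_mod256_nonneg b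
  have h1 := pv_mod256_lt b
  have hcast : PySem.Int.mod b 256 = (((PySem.Int.mod b 256).toNat : Nat) : Int) :=
    (Int.toNat_of_nonneg h0).symm
  rw [hcast]
  have key : ∀ p : Fin 256,
      (decide (PySem.Int.band ((p.val : Nat) : Int) 0xc0 = 0x80))
        = (decide (PySem.Int.floordiv ((p.val : Nat) : Int) 64 = 2)) := by
    decide
  have := key ⟨(PySem.Int.mod b 256).toNat, by omega⟩
  constructor <;> intro hh
  · exact of_decide_eq_true (by rw [← this]; exact decide_eq_true hh)
  · exact of_decide_eq_true (by rw [this]; exact decide_eq_true hh)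

-- low six bits: b & 0x3f is Python's b % 64
set_option maxRecDepth 100000 in
theorem pv_low6 (b : Int) : PySem.Int.band b 0x3f = PySem.Int.mod b 64 := by
  rw [pv_band_mod_loc b 0x3f (by norm_num) (by norm_num)]
  have hmm : PySem.Int.mod b 64 = PySem.Int.mod (PySem.Int.mod b 256) 64 := by
    rw [PySem.Int.mod_eq_emod_of_pos (b := (64:Int)) (by norm_num),
        PySem.Int.mod_eq_emod_of_pos (b := (256:Int)) (by norm_num),
        PySem.Int.mod_eq_emod_of_pos (by norm_num)]
    exact (Int.emod_emod_of_dvd b (by norm_num)).symm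
  rw [hmm]
  have h0 := pv_mod256_nonneg b
  have h1 := pv_mod256_lt b
  have hcast : PySem.Int.mod b 256 = (((PySem.Int.mod b 256).toNat : Nat) : Int) :=
    (Int.toNat_of_nonneg h0).symm
  rw [hcast]
  have key : ∀ p : Fin 256,
      PySem.Int.band ((p.val : Nat) : Int) 0x3f = PySem.Int.mod ((p.val : Nat) : Int) 64 := by
    decide
  exact key ⟨(PySem.Int.mod b 256).toNat, by omega⟩

-- one shift-distribution step: A's positional OR matches B's shift-accumulate
theorem pv_shift_or (r v : Int) (hr : 0 ≤ r) (hv : 0 ≤ v) (t : Nat) :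
    PySem.Int.bor (r <<< (t+6)) (v <<< t) = (PySem.Int.bor (r <<< (6:Nat)) v) <<< t := by
  rw [show r = ((r.toNat : Nat) : Int) from (Int.toNat_of_nonneg hr).symm,
      show v = ((v.toNat : Nat) : Int) from (Int.toNat_of_nonneg hv).symm]
  rw [show ((r.toNat : Nat) : Int) <<< (t+6) = ((r.toNat <<< (t+6) : Nat) : Int) from rfl,
      show ((v.toNat : Nat) : Int) <<< t = ((v.toNat <<< t : Nat) : Int) from rfl,
      show ((r.toNat : Nat) : Int) <<< (6:Nat) = ((r.toNat <<< 6 : Nat) : Int) from rfl]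
  rw [PySem.Int.bor_of_nonneg (by positivity) (by positivity),
      PySem.Int.bor_of_nonneg (by positivity) (by positivity)]
  rw [Int.toNat_natCast, Int.toNat_natCast, Int.toNat_natCast, Int.toNat_natCast]
  rw [show ((r.toNat <<< 6 ||| v.toNat : Nat) : Int) <<< t = (((r.toNat <<< 6 ||| v.toNat) <<< t : Nat) : Int) from rfl]
  rw [Nat.shiftLeft_or_distrib]
  rw [show t + 6 = 6 + t from by omega, Nat.shiftLeft_add]

-- B's Horner step in A's clothes: or-ing a small value into a shifted accumulator is arithmetic
theorem pv_or_horner (r v : Int) (hr : 0 ≤ r) (hv0 : 0 ≤ v) (hv : v < 64) :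
    PySem.Int.bor (r <<< (6:Nat)) v = r * 64 + v := by
  rw [show r = ((r.toNat : Nat) : Int) from (Int.toNat_of_nonneg hr).symm,
      show v = ((v.toNat : Nat) : Int) from (Int.toNat_of_nonneg hv0).symm]
  rw [show ((r.toNat : Nat) : Int) <<< (6:Nat) = ((r.toNat <<< 6 : Nat) : Int) from rfl]
  rw [PySem.Int.bor_of_nonneg (by positivity) (by positivity)]
  rw [Int.toNat_natCast, Int.toNat_natCast]
  have hd : r.toNat <<< 6 &&& v.toNat = 0 := by
    apply Nat.eq_of_testBit_eq; intro i
    simp only [Nat.testBit_and, Nat.testBit_shiftLeft, Nat.zero_testBit]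
    rcases lt_or_ge i 6 with hi | hi
    · simp [Nat.not_le.mpr hi]
    · have hvb : v.toNat.testBit i = false := by
        apply Nat.testBit_lt_two_pow
        calc v.toNat < 64 := by omega
          _ = 2^6 := rfl
          _ ≤ 2^i := Nat.pow_le_pow_right (by norm_num) hi
      simp [hvb]
  rw [pv_or_eq_add _ _ hd, Nat.shiftLeft_eq]
  push_cast
  ring

-- A's index loop over [jn, inat) equals B's two staged passes over the slice c[jn:inat]
theorem pv_cont_eq (c : List Int) (inat : Nat) (hlen : inat ≤ c.length) :
    ∀ (k jn : Nat) (res : Int), 0 ≤ res → jn + k = inat →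
      utf8A_cont c (inat:Int) (res <<< (6*k)) (PySem.List.pyRange (jn:Int) (inat:Int) 1) =
        (if ((c.drop jn).take k).all (fun b => PySem.Int.floordiv (PySem.Int.mod b 256) 64 == 2) = false
         then ((1:Int), none)
         else ((inat:Int), some (((c.drop jn).take k).foldl (fun v b => v * 64 + PySem.Int.mod b 64) res))) := by
  intro k
  induction k with
  | zero =>
    intro jn res hres hk
    rw [show PySem.List.pyRange (jn:Int) (inat:Int) 1 = [] from by
      apply PySem.List.pyRange_one_eq_nil; omega]
    simp only [utf8A_cont, List.take_zero, List.all_nil, List.foldl_nil]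
    rw [show 6*0 = 0 from rfl, Int.shiftLeft_zero]
    rfl
  | succ k ih =>
    intro jn res hres hk
    have hji : (jn:Int) < (inat:Int) := by omega
    have hjlt : jn < c.length := by omega
    rw [PySem.List.pyRange_one_cons hji]
    have hdrop : c.drop jn = c.getD jn 0 :: c.drop (jn+1) := by
      rw [List.getD_eq_getElem c 0 hjlt]; exact List.drop_eq_getElem_cons hjlt
    have hget : PySem.List.pyGetD c (jn:Int) 0 = c.getD jn 0 :=
      PySem.List.pyGetD_natCast c jn 0
    simp only [utf8A_cont, hget, hdrop, List.take_succ_cons, List.all_cons, List.foldl_cons]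
    by_cases hgood : PySem.Int.band (c.getD jn 0) 0xc0 = 0x80
    · rw [if_neg (not_not_intro hgood)]
      have hgoodB : (PySem.Int.floordiv (PySem.Int.mod (c.getD jn 0) 256) 64 == 2) = true := by
        simp only [beq_iff_eq]
        exact (pv_good (c.getD jn 0)).mp hgood
      rw [hgoodB, Bool.true_and]
      have hv0 : 0 ≤ PySem.Int.mod (c.getD jn 0) 64 := PySem.Int.mod_nonneg _ (by norm_num)
      have hvlt : PySem.Int.mod (c.getD jn 0) 64 < 64 := PySem.Int.mod_lt _ (by norm_num)
      have hsh : (6*((inat:Int)-(jn:Int)-1)).toNat = 6*k := by omega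
      rw [hsh, pv_low6]
      have ht : 6*(k+1) = 6*k+6 := by omega
      rw [ht, pv_shift_or res _ hres hv0 (6*k), pv_or_horner res _ hres hv0 hvlt]
      have hres' : 0 ≤ res * 64 + PySem.Int.mod (c.getD jn 0) 64 := by positivity
      have := ih (jn+1) (res * 64 + PySem.Int.mod (c.getD jn 0) 64) hres' (by omega)
      rw [show ((jn:Int) + 1) = ((jn+1 : Nat) : Int) from by push_cast; ring]
      exact this
    · rw [if_pos hgood]
      have hgoodB : (PySem.Int.floordiv (PySem.Int.mod (c.getD jn 0) 256) 64 == 2) = false := by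
        simp only [beq_eq_false_iff_ne, ne_eq]
        intro hc
        exact hgood ((pv_good (c.getD jn 0)).mpr hc)
      rw [hgoodB, Bool.false_and]
      rfl

-- ===== VERDICT (by name: the statement is the Claim_ definition above) =====
theorem utf8_to_unicode_py_spec : Claim_equal_utf8_to_unicode_py := by
  intro c _ hPre
  unfold Spec_utf8_to_unicode_py
  unfold utf8_to_unicode_py utf8_to_unicode_py_alt
  simp only []
  by_cases h80 : PySem.Int.band (PySem.List.pyGetD c 0 0) 0x80 = 0
  · rw [if_pos h80, if_pos ((pv_ascii _).mp h80)]
  · rw [if_neg h80, if_neg (by intro hc; exact h80 ((pv_ascii _).mpr hc))]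
    rw [pv_A_search_eq, pv_headAB, pv_B_rest_eq]
    cases hh : pv_headB (PySem.Int.mod (PySem.List.pyGetD c 0 0) 256) with
    | none => rfl
    | some nd =>
      obtain ⟨n, d⟩ := nd
      obtain ⟨⟨hn2, hn6⟩, hdval⟩ := pv_headB_cases _ n d hh
      dsimp only
      by_cases hlenlt : PySem.List.len c < n
      · rw [if_pos hlenlt, if_pos hlenlt]
      · rw [if_neg hlenlt, if_neg hlenlt]
        have hlen : n ≤ (c.length : Int) := by
          rw [PySem.List.len_eq] at hlenlt; omega
        set inat : Nat := n.toNat with hinat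
        have hni : n = (inat : Int) := by omega
        have hd0 : 0 ≤ d := by
          rw [hdval]
          apply PySem.Int.mod_nonneg
          rw [show (1:Int) <<< (7-n).toNat = (((1 <<< (7-n).toNat : Nat)) : Int) from rfl,
              show (1 <<< (7-n).toNat : Nat) = 2^((7-n).toNat) from by rw [Nat.shiftLeft_eq, one_mul]]
          positivity
        have hslice : PySem.List.slice c (some 1) (some ((inat : Nat) : Int)) = (c.drop 1).take (inat - 1) := by
          rw [show ((1:Int)) = ((1:Nat) : Int) from rfl, PySem.List.slice_natCast]
        have hcont := pv_cont_eq c inat (by omega) (inat - 1) 1 d hd0 (by omega)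
        rw [show ((1:Nat) : Int) = (1:Int) from rfl] at hcont
        rw [hni, hslice]
        rw [show (6*((inat:Int)-1)).toNat = 6*(inat-1) from by omega]
        exact hcont
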